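-- pv_equiv track=rewrite | github.com/egavrin/devagent | ai_dev_agent/tools/filesystem/search_replace.py | _auto_correct_marker
-- ===== SOURCE A (Python) =====
-- UPDATE_MARKER = "*** Update File:"
--
-- ADD_MARKER = "*** Add File:"
--
-- DELETE_MARKER = "*** Delete File:"
--
-- MOVE_MARKER = "*** Move to:"
--
-- def _auto_correct_marker(line: str) -> tuple[str | None, str]:
--     """Attempt to auto-correct a marker missing its colon.
--
--     Returns:
--         (corrected_line, warning_message) or (None, "") if can't correct
--     """
--     # Define marker variants without colon and their corrections
--     corrections = [
--         ("*** Update File ", UPDATE_MARKER),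
--         ("*** Add File ", ADD_MARKER),
--         ("*** Delete File ", DELETE_MARKER),
--         ("*** Move to ", MOVE_MARKER),
--         # Also handle no space after "File"
--         ("*** Update File", UPDATE_MARKER),
--         ("*** Add File", ADD_MARKER),
--         ("*** Delete File", DELETE_MARKER),
--         ("*** Move to", MOVE_MARKER),
--     ]
--
--     for wrong_prefix, correct_marker in corrections:
--         if line.startswith(wrong_prefix) and not line.startswith(correct_marker):
--             # Extract the path part
--             path_part = line[len(wrong_prefix) :].strip()
--             corrected = f"{correct_marker} {path_part}"
--             warning = f"Auto-corrected '{wrong_prefix.strip()}' to '{correct_marker}' for path '{path_part}'"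
--             return corrected, warning
--
--     return None, ""
-- ===== SOURCE B (Python) =====
-- UPDATE_MARKER = "*** Update File:"
-- ADD_MARKER = "*** Add File:"
-- DELETE_MARKER = "*** Delete File:"
-- MOVE_MARKER = "*** Move to:"
--
-- _KEYWORDS = ("Update File", "Add File", "Delete File", "Move to")
--
--
-- def _auto_correct_marker(line: str) -> tuple[str | None, str]:
--     """Attempt to auto-correct a marker missing its colon.
--
--     Peels the common "*** " prefix once, then matches the keyword and checks
--     that it is not already followed by a colon; marker and warning are built
--     from the keyword instead of an 8-entry correction table.
--     """
--     if line.startswith("*** "):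
--         rest = line[4:]
--         for keyword in _KEYWORDS:
--             tail = rest[len(keyword):]
--             if rest.startswith(keyword) and not tail.startswith(":"):
--                 path_part = tail.strip()
--                 marker = f"*** {keyword}:"
--                 warning = f"Auto-corrected '*** {keyword}' to '{marker}' for path '{path_part}'"
--                 return f"{marker} {path_part}", warning
--     return None, ""
-- ===== Notes on version B (the rewrite author's own statement) =====
-- stated objective: simpler
-- what changed: Replaces the 8-entry wrong-prefix/correct-marker table scanned against the whole line by a single peel of the shared three-asterisk marker prefix followed by a 4-keyword match with a next-char-is-not-colon check, building the corrected marker and warning from the keyword.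
import Mathlib
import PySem

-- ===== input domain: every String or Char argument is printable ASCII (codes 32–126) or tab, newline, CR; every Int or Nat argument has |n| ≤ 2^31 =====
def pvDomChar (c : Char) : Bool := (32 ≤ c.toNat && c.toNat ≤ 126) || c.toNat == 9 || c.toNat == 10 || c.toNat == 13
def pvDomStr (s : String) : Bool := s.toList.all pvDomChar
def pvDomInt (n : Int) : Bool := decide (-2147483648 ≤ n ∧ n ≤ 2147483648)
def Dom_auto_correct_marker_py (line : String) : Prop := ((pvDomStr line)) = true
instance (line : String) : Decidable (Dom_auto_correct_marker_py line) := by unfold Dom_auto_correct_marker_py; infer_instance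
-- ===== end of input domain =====

-- B replaces A's 8-entry wrong-prefix table scanned against the whole line by one peel of the
-- common "*** " prefix plus a 4-keyword match with a not-followed-by-colon check (objective: simpler).

-- ===== PORT A =====
-- the 8-entry correction table of A, in A's order
def acmCorrections : List (String × String) :=
  [("*** Update File ", "*** Update File:"),
   ("*** Add File ", "*** Add File:"),
   ("*** Delete File ", "*** Delete File:"),
   ("*** Move to ", "*** Move to:"),
   ("*** Update File", "*** Update File:"),
   ("*** Add File", "*** Add File:"),
   ("*** Delete File", "*** Delete File:"),
   ("*** Move to", "*** Move to:")]

-- the 'for wrong_prefix, correct_marker in corrections' loop of A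
def acmLoopA (line : String) : List (String × String) → Option String × String
  | [] => (none, "")
  | (wp, cm) :: rest =>
    if PySem.Str.startswith line wp && !PySem.Str.startswith line cm then
      let pathPart := PySem.Str.strip (PySem.Str.slice line (some (PySem.Str.len wp)) none)
      (some (cm ++ " " ++ pathPart),
       "Auto-corrected '" ++ PySem.Str.strip wp ++ "' to '" ++ cm ++ "' for path '" ++ pathPart ++ "'")
    else acmLoopA line rest

def auto_correct_marker_py (line : String) : Option String × String :=
  acmLoopA line acmCorrections

-- ===== PORT B =====
-- the 4 keywords of B
def acmKeywords : List String := ["Update File", "Add File", "Delete File", "Move to"]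

-- the 'for keyword in _KEYWORDS' loop of B, over rest = line[4:]
def acmLoopB (rest : String) : List String → Option String × String
  | [] => (none, "")
  | kw :: ks =>
    let tail := PySem.Str.slice rest (some (PySem.Str.len kw)) none
    if PySem.Str.startswith rest kw && !PySem.Str.startswith tail ":" then
      let pathPart := PySem.Str.strip tail
      let marker := "*** " ++ kw ++ ":"
      (some (marker ++ " " ++ pathPart),
       "Auto-corrected '*** " ++ kw ++ "' to '" ++ marker ++ "' for path '" ++ pathPart ++ "'")
    else acmLoopB rest ks

def auto_correct_marker_py_alt (line : String) : Option String × String :=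
  if PySem.Str.startswith line "*** " then
    acmLoopB (PySem.Str.slice line (some 4) none) acmKeywords
  else (none, "")

-- ===== PRECONDITION & SPEC =====
def Spec_auto_correct_marker_py (line : String) (out : Option String × String) : Prop := out = auto_correct_marker_py_alt line
instance (line : String) (out : Option String × String) : Decidable (Spec_auto_correct_marker_py line out) := by unfold Spec_auto_correct_marker_py; infer_instance

-- ===== CLAIM (what is proved, stated in full; the proofs are below) =====
def Claim_equal_auto_correct_marker_py : Prop := ∀ (line : String), Dom_auto_correct_marker_py line → Spec_auto_correct_marker_py line (auto_correct_marker_py line)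

-- ===== LEMMAS AND PROOFS =====

-- isPrefixOf distributes over an append in the pattern
theorem acm_prefixOf_append (p q t : List Char) :
    List.isPrefixOf (p ++ q) t = (List.isPrefixOf p t && List.isPrefixOf q (t.drop p.length)) := by
  induction p generalizing t with
  | nil => simp
  | cons a p ih =>
    cases t with
    | nil => simp [List.isPrefixOf]
    | cons c t => simp [List.isPrefixOf, ih, Bool.and_assoc]

-- strip ignores a leading space
theorem acm_strip_cons_space (v : List Char) :
    PySem.Chars.strip (' ' :: v) = PySem.Chars.strip v := by
  simp [PySem.Chars.strip, PySem.Chars.lstrip, show PySem.Chars.isspace ' ' = true from rfl]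

-- B's two nested from-slices collapse to A's single from-slice
theorem acm_path (line : String) (a b : Int) (ha : 0 ≤ a) (hb : 0 ≤ b) :
    PySem.Str.strip (PySem.Str.slice (PySem.Str.slice line (some a)) (some b))
      = PySem.Str.strip (PySem.Str.slice line (some (a + b))) := by
  rw [← String.toList_inj]
  simp only [PySem.Str.toList_strip, PySem.Str.toList_slice, PySem.Chars.slice_eq_listSlice,
    PySem.List.slice_from _ ha, PySem.List.slice_from _ hb,
    PySem.List.slice_from _ (by omega : (0:Int) ≤ a + b), List.drop_drop]
  have : a.toNat + b.toNat = (a + b).toNat := by omega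
  rw [this]

theorem acm_star_update (line : String) (u : List Char)
    (hcs : line.toList = '*'::'*'::'*'::' '::(("Update File" : String).toList ++ u)) :
    auto_correct_marker_py line = auto_correct_marker_py_alt line := by
  have hst1 : PySem.Str.strip "*** Update File " = "*** Update File" := by decide
  have hst2 : PySem.Str.strip "*** Update File" = "*** Update File" := by decide
  have sl4 := fun xs => PySem.List.slice_from (α := Char) xs (show (0:Int) ≤ 4 by norm_num)
  have slk := fun xs => PySem.List.slice_from (α := Char) xs (show (0:Int) ≤ 11 by norm_num)
  match u with
  | c :: v =>
    by_cases hc : c = ':'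
    · subst hc
      simp [auto_correct_marker_py, auto_correct_marker_py_alt, acmLoopA, acmLoopB,
        acmCorrections, acmKeywords, PySem.Str.startswith_eq, PySem.Chars.startswith, hcs,
        List.isPrefixOf, sl4, slk]
    · by_cases hsp : c = ' '
      · subst hsp
        have hpath : PySem.Str.strip (PySem.Str.slice line (some 16))
            = PySem.Str.strip (PySem.Str.slice line (some 15)) := by
          rw [← String.toList_inj]
          simp [PySem.Str.toList_strip, PySem.Str.toList_slice, PySem.Chars.slice_eq_listSlice,
            PySem.List.slice_from _ (show (0:Int) ≤ 16 by norm_num),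
            PySem.List.slice_from _ (show (0:Int) ≤ 15 by norm_num),
            hcs, acm_strip_cons_space]
        simp [auto_correct_marker_py, auto_correct_marker_py_alt, acmLoopA, acmLoopB,
          acmCorrections, acmKeywords, PySem.Str.startswith_eq, PySem.Chars.startswith, hcs,
          List.isPrefixOf, acm_path, hst1, sl4, slk, hpath]
      · have hc' : (':' == c) = false := by simp [Ne.symm hc]
        have hsp' : (' ' == c) = false := by simp [Ne.symm hsp]
        simp [auto_correct_marker_py, auto_correct_marker_py_alt, acmLoopA, acmLoopB,
          acmCorrections, acmKeywords, PySem.Str.startswith_eq, PySem.Chars.startswith, hcs,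
          List.isPrefixOf, acm_path, hst2, sl4, slk, hc', hsp']
  | [] =>
    simp [auto_correct_marker_py, auto_correct_marker_py_alt, acmLoopA, acmLoopB,
      acmCorrections, acmKeywords, PySem.Str.startswith_eq, PySem.Chars.startswith, hcs,
      List.isPrefixOf, acm_path, hst2, sl4, slk]

theorem acm_star_add (line : String) (u : List Char)
    (hcs : line.toList = '*'::'*'::'*'::' '::(("Add File" : String).toList ++ u)) :
    auto_correct_marker_py line = auto_correct_marker_py_alt line := by
  have hst1 : PySem.Str.strip "*** Add File " = "*** Add File" := by decide
  have hst2 : PySem.Str.strip "*** Add File" = "*** Add File" := by decide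
  have sl4 := fun xs => PySem.List.slice_from (α := Char) xs (show (0:Int) ≤ 4 by norm_num)
  have slk := fun xs => PySem.List.slice_from (α := Char) xs (show (0:Int) ≤ 8 by norm_num)
  match u with
  | c :: v =>
    by_cases hc : c = ':'
    · subst hc
      simp [auto_correct_marker_py, auto_correct_marker_py_alt, acmLoopA, acmLoopB,
        acmCorrections, acmKeywords, PySem.Str.startswith_eq, PySem.Chars.startswith, hcs,
        List.isPrefixOf, sl4, slk]
    · by_cases hsp : c = ' '
      · subst hsp
        have hpath : PySem.Str.strip (PySem.Str.slice line (some 13))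
            = PySem.Str.strip (PySem.Str.slice line (some 12)) := by
          rw [← String.toList_inj]
          simp [PySem.Str.toList_strip, PySem.Str.toList_slice, PySem.Chars.slice_eq_listSlice,
            PySem.List.slice_from _ (show (0:Int) ≤ 13 by norm_num),
            PySem.List.slice_from _ (show (0:Int) ≤ 12 by norm_num),
            hcs, acm_strip_cons_space]
        simp [auto_correct_marker_py, auto_correct_marker_py_alt, acmLoopA, acmLoopB,
          acmCorrections, acmKeywords, PySem.Str.startswith_eq, PySem.Chars.startswith, hcs,
          List.isPrefixOf, acm_path, hst1, sl4, slk, hpath]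
      · have hc' : (':' == c) = false := by simp [Ne.symm hc]
        have hsp' : (' ' == c) = false := by simp [Ne.symm hsp]
        simp [auto_correct_marker_py, auto_correct_marker_py_alt, acmLoopA, acmLoopB,
          acmCorrections, acmKeywords, PySem.Str.startswith_eq, PySem.Chars.startswith, hcs,
          List.isPrefixOf, acm_path, hst2, sl4, slk, hc', hsp']
  | [] =>
    simp [auto_correct_marker_py, auto_correct_marker_py_alt, acmLoopA, acmLoopB,
      acmCorrections, acmKeywords, PySem.Str.startswith_eq, PySem.Chars.startswith, hcs,
      List.isPrefixOf, acm_path, hst2, sl4, slk]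

theorem acm_star_delete (line : String) (u : List Char)
    (hcs : line.toList = '*'::'*'::'*'::' '::(("Delete File" : String).toList ++ u)) :
    auto_correct_marker_py line = auto_correct_marker_py_alt line := by
  have hst1 : PySem.Str.strip "*** Delete File " = "*** Delete File" := by decide
  have hst2 : PySem.Str.strip "*** Delete File" = "*** Delete File" := by decide
  have sl4 := fun xs => PySem.List.slice_from (α := Char) xs (show (0:Int) ≤ 4 by norm_num)
  have slk := fun xs => PySem.List.slice_from (α := Char) xs (show (0:Int) ≤ 11 by norm_num)
  match u with
  | c :: v =>
    by_cases hc : c = ':'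
    · subst hc
      simp [auto_correct_marker_py, auto_correct_marker_py_alt, acmLoopA, acmLoopB,
        acmCorrections, acmKeywords, PySem.Str.startswith_eq, PySem.Chars.startswith, hcs,
        List.isPrefixOf, sl4, slk]
    · by_cases hsp : c = ' '
      · subst hsp
        have hpath : PySem.Str.strip (PySem.Str.slice line (some 16))
            = PySem.Str.strip (PySem.Str.slice line (some 15)) := by
          rw [← String.toList_inj]
          simp [PySem.Str.toList_strip, PySem.Str.toList_slice, PySem.Chars.slice_eq_listSlice,
            PySem.List.slice_from _ (show (0:Int) ≤ 16 by norm_num),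
            PySem.List.slice_from _ (show (0:Int) ≤ 15 by norm_num),
            hcs, acm_strip_cons_space]
        simp [auto_correct_marker_py, auto_correct_marker_py_alt, acmLoopA, acmLoopB,
          acmCorrections, acmKeywords, PySem.Str.startswith_eq, PySem.Chars.startswith, hcs,
          List.isPrefixOf, acm_path, hst1, sl4, slk, hpath]
      · have hc' : (':' == c) = false := by simp [Ne.symm hc]
        have hsp' : (' ' == c) = false := by simp [Ne.symm hsp]
        simp [auto_correct_marker_py, auto_correct_marker_py_alt, acmLoopA, acmLoopB,
          acmCorrections, acmKeywords, PySem.Str.startswith_eq, PySem.Chars.startswith, hcs,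
          List.isPrefixOf, acm_path, hst2, sl4, slk, hc', hsp']
  | [] =>
    simp [auto_correct_marker_py, auto_correct_marker_py_alt, acmLoopA, acmLoopB,
      acmCorrections, acmKeywords, PySem.Str.startswith_eq, PySem.Chars.startswith, hcs,
      List.isPrefixOf, acm_path, hst2, sl4, slk]

theorem acm_star_move (line : String) (u : List Char)
    (hcs : line.toList = '*'::'*'::'*'::' '::(("Move to" : String).toList ++ u)) :
    auto_correct_marker_py line = auto_correct_marker_py_alt line := by
  have hst1 : PySem.Str.strip "*** Move to " = "*** Move to" := by decide
  have hst2 : PySem.Str.strip "*** Move to" = "*** Move to" := by decide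
  have sl4 := fun xs => PySem.List.slice_from (α := Char) xs (show (0:Int) ≤ 4 by norm_num)
  have slk := fun xs => PySem.List.slice_from (α := Char) xs (show (0:Int) ≤ 7 by norm_num)
  match u with
  | c :: v =>
    by_cases hc : c = ':'
    · subst hc
      simp [auto_correct_marker_py, auto_correct_marker_py_alt, acmLoopA, acmLoopB,
        acmCorrections, acmKeywords, PySem.Str.startswith_eq, PySem.Chars.startswith, hcs,
        List.isPrefixOf, sl4, slk]
    · by_cases hsp : c = ' '
      · subst hsp
        have hpath : PySem.Str.strip (PySem.Str.slice line (some 12))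
            = PySem.Str.strip (PySem.Str.slice line (some 11)) := by
          rw [← String.toList_inj]
          simp [PySem.Str.toList_strip, PySem.Str.toList_slice, PySem.Chars.slice_eq_listSlice,
            PySem.List.slice_from _ (show (0:Int) ≤ 12 by norm_num),
            PySem.List.slice_from _ (show (0:Int) ≤ 11 by norm_num),
            hcs, acm_strip_cons_space]
        simp [auto_correct_marker_py, auto_correct_marker_py_alt, acmLoopA, acmLoopB,
          acmCorrections, acmKeywords, PySem.Str.startswith_eq, PySem.Chars.startswith, hcs,
          List.isPrefixOf, acm_path, hst1, sl4, slk, hpath]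
      · have hc' : (':' == c) = false := by simp [Ne.symm hc]
        have hsp' : (' ' == c) = false := by simp [Ne.symm hsp]
        simp [auto_correct_marker_py, auto_correct_marker_py_alt, acmLoopA, acmLoopB,
          acmCorrections, acmKeywords, PySem.Str.startswith_eq, PySem.Chars.startswith, hcs,
          List.isPrefixOf, acm_path, hst2, sl4, slk, hc', hsp']
  | [] =>
    simp [auto_correct_marker_py, auto_correct_marker_py_alt, acmLoopA, acmLoopB,
      acmCorrections, acmKeywords, PySem.Str.startswith_eq, PySem.Chars.startswith, hcs,
      List.isPrefixOf, acm_path, hst2, sl4, slk]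

-- no keyword follows "*** ": both sides fall through to (none, "")
theorem acm_star_none (line : String) (t : List Char)
    (hcs : line.toList = '*'::'*'::'*'::' '::t)
    (hU : ¬ ['U','p','d','a','t','e',' ','F','i','l','e'] <+: t)
    (hA : ¬ ['A','d','d',' ','F','i','l','e'] <+: t)
    (hD : ¬ ['D','e','l','e','t','e',' ','F','i','l','e'] <+: t)
    (hM : ¬ ['M','o','v','e',' ','t','o'] <+: t) :
    auto_correct_marker_py line = auto_correct_marker_py_alt line := by
  have hU' : ¬ ['U','p','d','a','t','e',' ','F','i','l','e',' '] <+: t := fun h => hU (List.IsPrefix.trans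
    (by rw [show ['U','p','d','a','t','e',' ','F','i','l','e',' '] = ['U','p','d','a','t','e',' ','F','i','l','e'] ++ [' '] from rfl]; exact List.prefix_append _ _) h)
  have hA' : ¬ ['A','d','d',' ','F','i','l','e',' '] <+: t := fun h => hA (List.IsPrefix.trans
    (by rw [show ['A','d','d',' ','F','i','l','e',' '] = ['A','d','d',' ','F','i','l','e'] ++ [' '] from rfl]; exact List.prefix_append _ _) h)
  have hD' : ¬ ['D','e','l','e','t','e',' ','F','i','l','e',' '] <+: t := fun h => hD (List.IsPrefix.trans
    (by rw [show ['D','e','l','e','t','e',' ','F','i','l','e',' '] = ['D','e','l','e','t','e',' ','F','i','l','e'] ++ [' '] from rfl]; exact List.prefix_append _ _) h)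
  have hM' : ¬ ['M','o','v','e',' ','t','o',' '] <+: t := fun h => hM (List.IsPrefix.trans
    (by rw [show ['M','o','v','e',' ','t','o',' '] = ['M','o','v','e',' ','t','o'] ++ [' '] from rfl]; exact List.prefix_append _ _) h)
  have sl4 := fun xs => PySem.List.slice_from (α := Char) xs (show (0:Int) ≤ 4 by norm_num)
  simp [auto_correct_marker_py, auto_correct_marker_py_alt, acmLoopA, acmLoopB,
    acmCorrections, acmKeywords, PySem.Str.startswith_eq, PySem.Chars.startswith, hcs,
    List.isPrefixOf_iff_prefix, sl4, hU, hA, hD, hM, hU', hA', hD', hM']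

-- the line does not start with "*** ": both sides fall through to (none, "")
theorem acm_not_star (line : String)
    (h : ¬ ("*** " : String).toList <+: line.toList) :
    auto_correct_marker_py line = auto_correct_marker_py_alt line := by
  have h' : List.isPrefixOf (("*** " : String).toList) line.toList = false := by
    simp only [Bool.eq_false_iff, Ne, List.isPrefixOf_iff_prefix]; exact h
  have hfalse : ∀ (q : List Char), List.isPrefixOf (("*** " : String).toList ++ q) line.toList = false := by
    intro q; rw [acm_prefixOf_append, h']; rfl
  have eU1 : ("*** Update File " : String).toList = ("*** " : String).toList ++ ("Update File " : String).toList := rfl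
  have eU2 : ("*** Update File" : String).toList = ("*** " : String).toList ++ ("Update File" : String).toList := rfl
  have eA1 : ("*** Add File " : String).toList = ("*** " : String).toList ++ ("Add File " : String).toList := rfl
  have eA2 : ("*** Add File" : String).toList = ("*** " : String).toList ++ ("Add File" : String).toList := rfl
  have eD1 : ("*** Delete File " : String).toList = ("*** " : String).toList ++ ("Delete File " : String).toList := rfl
  have eD2 : ("*** Delete File" : String).toList = ("*** " : String).toList ++ ("Delete File" : String).toList := rfl
  have eM1 : ("*** Move to " : String).toList = ("*** " : String).toList ++ ("Move to " : String).toList := rfl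
  have eM2 : ("*** Move to" : String).toList = ("*** " : String).toList ++ ("Move to" : String).toList := rfl
  simp only [auto_correct_marker_py, auto_correct_marker_py_alt, acmLoopA, acmLoopB,
    acmCorrections, acmKeywords, PySem.Str.startswith_eq, PySem.Chars.startswith,
    eU1, eU2, eA1, eA2, eD1, eD2, eM1, eM2, hfalse, h',
    Bool.false_and, Bool.false_eq_true, ite_false]

-- ===== VERDICT (by name: the statement is the Claim_ definition above) =====
theorem auto_correct_marker_py_spec : Claim_equal_auto_correct_marker_py := by
  intro line _
  show auto_correct_marker_py line = auto_correct_marker_py_alt line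
  by_cases h : List.isPrefixOf (("*** " : String).toList) line.toList = true
  · obtain ⟨t, ht⟩ := List.isPrefixOf_iff_prefix.mp h
    have hcs : line.toList = '*'::'*'::'*'::' '::t := by rw [← ht]; rfl
    by_cases hU : List.isPrefixOf (("Update File" : String).toList) t = true
    · obtain ⟨u, hu⟩ := List.isPrefixOf_iff_prefix.mp hU
      exact acm_star_update line u (by rw [hcs, ← hu])
    · by_cases hA : List.isPrefixOf (("Add File" : String).toList) t = true
      · obtain ⟨u, hu⟩ := List.isPrefixOf_iff_prefix.mp hA
        exact acm_star_add line u (by rw [hcs, ← hu])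
      · by_cases hD : List.isPrefixOf (("Delete File" : String).toList) t = true
        · obtain ⟨u, hu⟩ := List.isPrefixOf_iff_prefix.mp hD
          exact acm_star_delete line u (by rw [hcs, ← hu])
        · by_cases hM : List.isPrefixOf (("Move to" : String).toList) t = true
          · obtain ⟨u, hu⟩ := List.isPrefixOf_iff_prefix.mp hM
            exact acm_star_move line u (by rw [hcs, ← hu])
          · exact acm_star_none line t hcs (by simpa using hU) (by simpa using hA)
              (by simpa using hD) (by simpa using hM)
  · exact acm_not_star line (by simpa using h)
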